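-- pv_equiv track=rewrite | github.com/Choi-Jinwoo/Algorithm | 프로그래머스/1, 2단계/조이스틱/main.py | solution
-- ===== SOURCE A (Python) =====
-- def diff_char(c):
--     diff_a = abs(ord(c) - ord('A'))
--     diff_z = abs(ord(c) - ord('Z')) + 1
--
--     return min(diff_a, diff_z)
--
-- def solution(name):
--     queue = [['A' * len(name), 0, 0]]
--     last_index = len(name) - 1
--
--     while len(queue) > 0:
--         current_name, index, cnt = queue.pop(0)
--         if current_name == name:
--             return cnt - 1
--
--         cnt += diff_char(name[index]) + 1
--         current_name = current_name[:index] + name[index] + current_name[index + 1:]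
--
--         if index - 1 < 0:
--             queue.append([current_name, last_index, cnt])
--         else:
--             queue.append([current_name, index - 1, cnt])
--
--         if index + 1 > last_index:
--             queue.append([current_name, 0, cnt])
--         else:
--             queue.append([current_name, index + 1, cnt])
-- ===== SOURCE B (Python) =====
-- def solution(name):
--     n = len(name)
--     target = frozenset(i for i in range(n) if name[i] != 'A')
--
--     def diff(i):
--         o = ord(name[i])
--         return min(abs(o - 65), abs(o - 90) + 1)
--
--     def dfs(idx, stamped, cnt, depth):
--         # depth-limited, left-first DFS: visits length-`depth` move words in lex order
--         if depth == 0: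
--             return cnt - 1 if target <= stamped else None
--         c2 = cnt + diff(idx) + 1
--         s2 = stamped | {idx}
--         r = dfs((idx - 1) % n, s2, c2, depth - 1)
--         if r is not None:
--             return r
--         return dfs((idx + 1) % n, s2, c2, depth - 1)
--
--     k = 0
--     while True:
--         r = dfs(0, frozenset(), 0, k)
--         if r is not None:
--             return r
--         k += 1
-- ===== Notes on version B (the rewrite author's own statement) =====
-- stated objective: alternative
-- what changed: A's FIFO breadth-first search over a queue of rebuilt strings (pop(0) shifts the whole queue, one string copy per state) is replaced by iterative-deepening left-first depth-first search over (cursor index, stamped-index frozenset, cost), which visits the same move sequences in the same order with no queue and no string surgery.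
import Mathlib
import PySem

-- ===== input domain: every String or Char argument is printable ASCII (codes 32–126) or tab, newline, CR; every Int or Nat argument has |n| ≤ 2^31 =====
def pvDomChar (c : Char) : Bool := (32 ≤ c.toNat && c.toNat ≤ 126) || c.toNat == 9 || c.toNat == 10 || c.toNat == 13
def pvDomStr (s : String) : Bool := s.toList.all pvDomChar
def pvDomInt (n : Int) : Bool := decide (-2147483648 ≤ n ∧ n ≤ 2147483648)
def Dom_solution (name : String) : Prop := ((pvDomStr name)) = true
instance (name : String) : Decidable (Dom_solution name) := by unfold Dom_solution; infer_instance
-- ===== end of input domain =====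

-- B replaces A's FIFO breadth-first search over a queue of rebuilt strings by
-- iterative-deepening left-first depth-first search over (position, stamped-index-set,
-- cost): the same move words in the same order, with no queue and no string surgery.

-- ===== PORT A =====
-- strings are ported as their List Char of code points (exact); 'A'*len(name) is List.replicate
def diffChar (c : Char) : Int :=
  let diffA := |(c.toNat : Int) - 65|
  let diffZ := |(c.toNat : Int) - 90| + 1
  min diffA diffZ

-- the while-loop; one fuel unit per queue pop (fuel is proven sufficient); 0 on the
-- unreachable exhaustion / empty-queue / IndexError branches
def solLoop (nm : List Char) (last : Int) : Nat → List (List Char × Int × Int) → Int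
  | 0, _ => 0
  | _ + 1, [] => 0
  | fuel + 1, (cur, index, cnt) :: rest =>
    if cur = nm then cnt - 1
    else
      match PySem.List.pyGet? nm index with
      | none => 0
      | some ch =>
        let cnt2 := cnt + diffChar ch + 1
        let cur2 := PySem.List.slice cur none (some index) ++ [ch] ++
                    PySem.List.slice cur (some (index + 1)) none
        let q1 := rest ++ [if index - 1 < 0 then (cur2, last, cnt2) else (cur2, index - 1, cnt2)]
        let q2 := q1 ++ [if index + 1 > last then (cur2, (0 : Int), cnt2) else (cur2, index + 1, cnt2)]
        solLoop nm last fuel q2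

def solution (name : String) : Int :=
  let nm := name.toList
  solLoop nm ((nm.length : Int) - 1) (2 ^ (nm.length + 1))
    [(List.replicate nm.length 'A', (0 : Int), (0 : Int))]

-- ===== PORT B =====
def diffB (nm : List Char) (i : Int) : Int :=
  match PySem.List.pyGet? nm i with
  | none => 0
  | some c => min |(c.toNat : Int) - 65| (|(c.toNat : Int) - 90| + 1)

-- depth-limited left-first DFS (Source B's dfs); depth is the structural recursion
def dfsB (nm : List Char) (tgt : PySem.Set Int) (n : Int) :
    Int → PySem.Set Int → Int → Nat → Option Int
  | _, stamped, cnt, 0 => if tgt.issubset stamped then some (cnt - 1) else none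
  | idx, stamped, cnt, depth + 1 =>
    let c2 := cnt + diffB nm idx + 1
    let s2 := stamped.add idx
    match dfsB nm tgt n (PySem.Int.mod (idx - 1) n) s2 c2 depth with
    | some r => some r
    | none => dfsB nm tgt n (PySem.Int.mod (idx + 1) n) s2 c2 depth

-- Source B's 'while True' over k = 0,1,2,… ; fuel is proven sufficient, 0 unreachable
def altLoop (nm : List Char) (tgt : PySem.Set Int) (n : Int) : Nat → Nat → Int
  | 0, _ => 0
  | fuel + 1, k =>
    match dfsB nm tgt n 0 PySem.Set.empty 0 k with
    | some r => r
    | none => altLoop nm tgt n fuel (k + 1)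

def solution_alt (name : String) : Int :=
  let nm := name.toList
  let n := nm.length
  let tgt : PySem.Set Int :=
    PySem.Set.ofList ((PySem.List.pyRange 0 (n : Int) 1).filter
      (fun i => PySem.List.pyGet? nm i != some 'A'))
  altLoop nm tgt (n : Int) (n + 1) 0

-- ===== PRECONDITION & SPEC =====
def Spec_solution (name : String) (out : Int) : Prop := out = solution_alt name
instance (name : String) (out : Int) : Decidable (Spec_solution name out) := by unfold Spec_solution; infer_instance

-- ===== CLAIM (what is proved, stated in full; the proofs are below) =====
def Claim_equal_solution : Prop := ∀ (name : String), Dom_solution name → Spec_solution name (solution name)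

-- ===== LEMMAS AND PROOFS =====

-- move words: false = cursor left (A's first child), true = cursor right
-- cursor step, written with A's literal branch conditions (last = n - 1)
def stepP (n : Int) (i : Int) : Bool → Int
  | false => if i - 1 < 0 then n - 1 else i - 1
  | true => if i + 1 > n - 1 then 0 else i + 1

-- positions stamped along a move word (the final position is not stamped)
def stampsOf (n : Int) : Int → List Bool → List Int
  | _, [] => []
  | i, b :: w => i :: stampsOf n (stepP n i b) w

def endOf (n : Int) : Int → List Bool → Int
  | i, [] => i
  | i, b :: w => endOf n (stepP n i b) w

def getCh (nm : List Char) (i : Int) : Char := (PySem.List.pyGet? nm i).getD 'A'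

def costOf (nm : List Char) (n : Int) : Int → List Bool → Int
  | _, [] => 0
  | i, b :: w => (diffChar (getCh nm i) + 1) + costOf nm n (stepP n i b) w

-- the string a state carries: name's character where stamped, 'A' elsewhere
def ov (nm : List Char) (ps : List Int) : List Char :=
  (List.range nm.length).map (fun j : Nat => if (j : Int) ∈ ps then getCh nm (j : Int) else 'A')

def tgtL (nm : List Char) : List Int :=
  (PySem.List.pyRange 0 (nm.length : Int) 1).filter (fun i => PySem.List.pyGet? nm i != some 'A')

def goalb (nm : List Char) (n : Int) (w : List Bool) : Bool :=
  decide (∀ t ∈ tgtL nm, t ∈ stampsOf n 0 w)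

-- all words of length k, in the breadth-first (lexicographic, left-first) order
def wordsOf : Nat → List (List Bool)
  | 0 => [[]]
  | k + 1 => (wordsOf k).map (List.cons false) ++ (wordsOf k).map (List.cons true)

-- A's queue, abstracted to move words
def bfsAbs (nm : List Char) (n : Int) : Nat → List (List Bool) → Int
  | 0, _ => 0
  | _ + 1, [] => 0
  | fuel + 1, w :: ws =>
    if ov nm (stampsOf n 0 w) = nm then costOf nm n 0 w - 1
    else bfsAbs nm n fuel (ws ++ [w ++ [false], w ++ [true]])

-- the queue entry corresponding to a move word
def stOf (nm : List Char) (w : List Bool) : List Char × Int × Int :=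
  (ov nm (stampsOf (nm.length : Int) 0 w), endOf (nm.length : Int) 0 w,
    costOf nm (nm.length : Int) 0 w)

-- ---------- step / walk basics ----------

lemma stepP_range (n i : Int) (b : Bool) (h0 : 0 ≤ i) (h1 : i < n) :
    0 ≤ stepP n i b ∧ stepP n i b < n := by
  cases b <;> simp only [stepP] <;> split_ifs <;> omega

lemma endOf_range (n : Int) (w : List Bool) (i : Int) (h0 : 0 ≤ i) (h1 : i < n) :
    0 ≤ endOf n i w ∧ endOf n i w < n := by
  induction w generalizing i with
  | nil => exact ⟨h0, h1⟩
  | cons b w ih =>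
    have := stepP_range n i b h0 h1
    exact ih _ this.1 this.2

lemma stepP_left_mod (n i : Int) (h0 : 0 ≤ i) (h1 : i < n) :
    PySem.Int.mod (i - 1) n = stepP n i false := by
  have hn : 0 < n := lt_of_le_of_lt h0 h1
  rw [PySem.Int.mod_eq_emod_of_pos hn]
  simp only [stepP]
  split_ifs with h
  · have hi : i = 0 := by omega
    subst hi
    conv_lhs => rw [show (0 - 1 : Int) = (n - 1) - n by ring, Int.sub_emod_right]
    exact Int.emod_eq_of_lt (by omega) (by omega)
  · exact Int.emod_eq_of_lt (by omega) (by omega)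

lemma stepP_right_mod (n i : Int) (h0 : 0 ≤ i) (h1 : i < n) :
    PySem.Int.mod (i + 1) n = stepP n i true := by
  have hn : 0 < n := lt_of_le_of_lt h0 h1
  rw [PySem.Int.mod_eq_emod_of_pos hn]
  simp only [stepP]
  split_ifs with h
  · have hi : i + 1 = n := by omega
    rw [hi, Int.emod_self]
  · exact Int.emod_eq_of_lt (by omega) (by omega)

lemma stampsOf_append (n : Int) (w : List Bool) (b : Bool) (i : Int) :
    stampsOf n i (w ++ [b]) = stampsOf n i w ++ [endOf n i w] := by
  induction w generalizing i with
  | nil => simp [stampsOf, endOf]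
  | cons c w ih => simp [stampsOf, endOf, ih]

lemma endOf_append (n : Int) (w : List Bool) (b : Bool) (i : Int) :
    endOf n i (w ++ [b]) = stepP n (endOf n i w) b := by
  induction w generalizing i with
  | nil => simp [endOf]
  | cons c w ih => simp [endOf, ih]

lemma costOf_append (nm : List Char) (n : Int) (w : List Bool) (b : Bool) (i : Int) :
    costOf nm n i (w ++ [b]) = costOf nm n i w + (diffChar (getCh nm (endOf n i w)) + 1) := by
  induction w generalizing i with
  | nil => simp only [List.nil_append, costOf, endOf]; omega
  | cons c w ih => simp only [List.cons_append, costOf, endOf, ih]; omega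

-- ---------- the overlay string ----------

lemma getCh_eq (nm : List Char) (j : Nat) (h : j < nm.length) : getCh nm (j : Int) = nm[j] := by
  simp [getCh, PySem.List.pyGet?_natCast, List.getElem?_eq_getElem h]

lemma pyGet?_getCh (nm : List Char) (i : Int) (h0 : 0 ≤ i) (h1 : i < (nm.length : Int)) :
    PySem.List.pyGet? nm i = some (getCh nm i) := by
  have h := PySem.List.pyGet?_eq_some_getElem nm h0 h1
  simp only [getCh, h, Option.getD_some]

lemma ov_nil (nm : List Char) : ov nm [] = List.replicate nm.length 'A' := by
  simp [ov, List.map_const']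

lemma length_ov (nm : List Char) (ps : List Int) : (ov nm ps).length = nm.length := by
  simp [ov]

lemma getElem_ov (nm : List Char) (ps : List Int) (j : Nat) (hj : j < nm.length) :
    (ov nm ps)[j]'(by rw [length_ov]; exact hj) =
      if (j : Int) ∈ ps then getCh nm (j : Int) else 'A' := by
  simp only [ov, List.getElem_map, List.getElem_range]

lemma mem_tgtL (nm : List Char) (t : Int) :
    t ∈ tgtL nm ↔ (0 ≤ t ∧ t < (nm.length : Int) ∧ getCh nm t ≠ 'A') := by
  simp only [tgtL, List.mem_filter, PySem.List.mem_pyRange_one]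
  constructor
  · rintro ⟨⟨h0, h1⟩, hne⟩
    refine ⟨h0, h1, ?_⟩
    rw [pyGet?_getCh nm t h0 h1] at hne
    simpa using hne
  · rintro ⟨h0, h1, hne⟩
    refine ⟨⟨h0, h1⟩, ?_⟩
    rw [pyGet?_getCh nm t h0 h1]
    simpa using hne

lemma ov_eq_iff (nm : List Char) (ps : List Int) :
    ov nm ps = nm ↔ ∀ t ∈ tgtL nm, t ∈ ps := by
  constructor
  · intro h t ht
    rw [mem_tgtL] at ht
    obtain ⟨h0, h1, hne⟩ := ht
    by_contra hmem
    have hj : t.toNat < nm.length := by omega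
    have hge := getElem_ov nm ps t.toNat hj
    rw [show ((t.toNat : Nat) : Int) = t by omega, if_neg hmem] at hge
    have hA : nm[t.toNat] = 'A' := by
      rw [← List.getElem_of_eq h]
      exact hge
    apply hne
    rw [show t = ((t.toNat : Nat) : Int) by omega, getCh_eq nm t.toNat hj, hA]
  · intro h
    apply List.ext_getElem (by rw [length_ov])
    intro j hj hj'
    rw [length_ov] at hj
    rw [getElem_ov nm ps j hj]
    by_cases hA : nm[j] = 'A'
    · split_ifs with hmem
      · rw [getCh_eq nm j hj, hA]
      · rw [hA]
    · have hmem : (j : Int) ∈ ps := by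
        apply h
        rw [mem_tgtL]
        refine ⟨by omega, by exact_mod_cast hj, ?_⟩
        rw [getCh_eq nm j hj]
        exact hA
      rw [if_pos hmem, getCh_eq nm j hj]

lemma map_split (f : Nat → Char) (n t : Nat) (ht : t < n) :
    (List.range n).map f =
      ((List.range t).map f ++ [f t]) ++ (List.range' (t + 1) (n - (t + 1))).map f := by
  conv_lhs => rw [show n = (t + 1) + (n - (t + 1)) by omega]
  rw [List.range_add, ← List.range'_eq_map_range,
    show List.range (t + 1) = List.range t ++ [t] from List.range_succ]
  simp [List.map_append]

lemma ov_surgery (nm : List Char) (ps : List Int) (i : Int)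
    (h0 : 0 ≤ i) (h1 : i < (nm.length : Int)) :
    PySem.List.slice (ov nm ps) none (some i) ++ [getCh nm i] ++
      PySem.List.slice (ov nm ps) (some (i + 1)) none = ov nm (ps ++ [i]) := by
  rw [PySem.List.slice_to _ h0, PySem.List.slice_from _ (by omega : (0 : Int) ≤ i + 1)]
  have htlt : i.toNat < nm.length := by omega
  have hti : ((i.toNat : Nat) : Int) = i := by omega
  have h1t : (i + 1).toNat = i.toNat + 1 := by omega
  rw [h1t]
  have hsplitL := map_split (fun j : Nat => if (j : Int) ∈ ps then getCh nm (j : Int) else 'A')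
    nm.length i.toNat htlt
  have hsplitR := map_split
    (fun j : Nat => if (j : Int) ∈ ps ++ [i] then getCh nm (j : Int) else 'A')
    nm.length i.toNat htlt
  have htake : List.take i.toNat (ov nm ps) =
      (List.range i.toNat).map
        (fun j : Nat => if (j : Int) ∈ ps then getCh nm (j : Int) else 'A') := by
    rw [ov, hsplitL, List.append_assoc]
    exact List.take_left' (by rw [List.length_map, List.length_range])
  have hdrop : List.drop (i.toNat + 1) (ov nm ps) =
      (List.range' (i.toNat + 1) (nm.length - (i.toNat + 1))).map
        (fun j : Nat => if (j : Int) ∈ ps then getCh nm (j : Int) else 'A') := by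
    rw [ov, hsplitL]
    exact List.drop_left' (by rw [List.length_append, List.length_map, List.length_range]; simp)
  rw [htake, hdrop, ov, hsplitR]
  congr 1
  congr 1
  · apply List.map_congr_left
    intro j hj
    rw [List.mem_range] at hj
    have hiff : ((j : Int) ∈ ps) ↔ ((j : Int) ∈ ps ++ [i]) := by
      simp only [List.mem_append, List.mem_singleton]
      constructor
      · exact Or.inl
      · rintro (h | h)
        · exact h
        · exfalso; omega
    exact if_congr hiff rfl rfl
  · have hmem : ((i.toNat : Nat) : Int) ∈ ps ++ [i] := by
      simp only [List.mem_append, List.mem_singleton]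
      exact Or.inr hti
    dsimp only
    rw [if_pos hmem, hti]
  · apply List.map_congr_left
    intro j hj
    rw [List.mem_range'_1] at hj
    have hiff : ((j : Int) ∈ ps) ↔ ((j : Int) ∈ ps ++ [i]) := by
      simp only [List.mem_append, List.mem_singleton]
      constructor
      · exact Or.inl
      · rintro (h | h)
        · exact h
        · exfalso; omega
    exact if_congr hiff rfl rfl

-- ---------- a goal word exists: the all-left word of length n ----------

lemma mem_stamps_allL (nm : List Char) (m : Nat) (i t : Int)
    (hn : 0 < (nm.length : Int)) (h0 : 0 ≤ i) (h1 : i < (nm.length : Int))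
    (ht0 : 0 ≤ t) (ht1 : t < (nm.length : Int))
    (hd : (i - t) % (nm.length : Int) < m) :
    t ∈ stampsOf (nm.length : Int) i (List.replicate m false) := by
  induction m generalizing i with
  | zero =>
    exfalso
    have := Int.emod_nonneg (i - t) (by omega : (nm.length : Int) ≠ 0)
    omega
  | succ m ih =>
    rw [List.replicate_succ]
    simp only [stampsOf]
    by_cases hit : t = i
    · subst hit; exact List.mem_cons_self
    · apply List.mem_cons_of_mem
      have hb := Int.emod_nonneg (i - t) (by omega : (nm.length : Int) ≠ 0)
      have hub : (i - t) % (nm.length : Int) < (nm.length : Int) :=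
        Int.emod_lt_of_pos _ (by omega)
      have hdp : 0 < (i - t) % (nm.length : Int) := by
        rcases hb.lt_or_eq with h | h
        · exact h
        · exfalso
          obtain ⟨k, hk⟩ := Int.dvd_of_emod_eq_zero h.symm
          rcases lt_trichotomy k 0 with hk0 | hk0 | hk0
          · nlinarith
          · rw [hk0, mul_zero] at hk
            exact hit (by omega)
          · nlinarith
      have hs := stepP_range (nm.length : Int) i false h0 h1
      apply ih (stepP (nm.length : Int) i false) hs.1 hs.2
      have hstep : stepP (nm.length : Int) i false % (nm.length : Int)
          = (i - 1) % (nm.length : Int) := by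
        simp only [stepP]
        split_ifs with h
        · have hi0 : i = 0 := by omega
          subst hi0
          rw [Int.emod_eq_of_lt (by omega) (by omega),
            show (0 : Int) - 1 = ((nm.length : Int) - 1) - (nm.length : Int) by ring,
            Int.sub_emod_right, Int.emod_eq_of_lt (by omega) (by omega)]
        · rfl
      have key : (stepP (nm.length : Int) i false - t) % (nm.length : Int)
          = (i - t) % (nm.length : Int) - 1 := by
        have e1 : (stepP (nm.length : Int) i false - t) % (nm.length : Int)
            = (i - 1 - t) % (nm.length : Int) := by
          rw [Int.sub_emod (stepP (nm.length : Int) i false) t, hstep, ← Int.sub_emod]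
        by_cases hN1 : (nm.length : Int) = 1
        · omega
        · have h1N : (1 : Int) % (nm.length : Int) = 1 :=
            Int.emod_eq_of_lt (by omega) (by omega)
          rw [e1, show i - 1 - t = (i - t) - 1 by ring, Int.sub_emod (i - t) 1, h1N,
            Int.emod_eq_of_lt (by omega) (by omega)]
      omega

lemma goalb_allL (nm : List Char) (hn : 0 < nm.length) :
    goalb nm (nm.length : Int) (List.replicate nm.length false) = true := by
  rw [goalb, decide_eq_true_iff]
  intro t ht
  rw [mem_tgtL] at ht
  obtain ⟨h0, h1, _⟩ := ht
  have hnz : (0 : Int) < (nm.length : Int) := by exact_mod_cast hn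
  apply mem_stamps_allL nm nm.length 0 t hnz le_rfl hnz h0 h1
  by_cases ht0 : t = 0
  · subst ht0
    simpa using (by exact_mod_cast hn : (0 : Int) < (nm.length : Int))
  · have : (0 - t) % (nm.length : Int) = (nm.length : Int) - t := by
      rw [show (0 - t : Int) = ((nm.length : Int) - t) - (nm.length : Int) by ring,
        Int.sub_emod_right]
      exact Int.emod_eq_of_lt (by omega) (by omega)
    omega

-- ---------- words of length k ----------

lemma length_wordsOf (k : Nat) : (wordsOf k).length = 2 ^ k := by
  induction k with
  | zero => rfl
  | succ k ih => simp [wordsOf, ih]; ring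

lemma mem_wordsOf (k : Nat) (w : List Bool) : w ∈ wordsOf k ↔ w.length = k := by
  induction k generalizing w with
  | zero => cases w <;> simp [wordsOf]
  | succ k ih =>
    simp only [wordsOf, List.mem_append, List.mem_map]
    constructor
    · rintro (⟨v, hv, rfl⟩ | ⟨v, hv, rfl⟩) <;> simp [(ih v).1 hv]
    · intro hw
      cases w with
      | nil => simp at hw
      | cons b v =>
        have hv : v ∈ wordsOf k := (ih v).2 (by simpa using hw)
        cases b
        · exact Or.inl ⟨v, hv, rfl⟩
        · exact Or.inr ⟨v, hv, rfl⟩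

lemma flatMap_cons_children (l : List (List Bool)) (b : Bool) :
    l.flatMap (fun a => [b :: (a ++ [false]), b :: (a ++ [true])]) =
      (l.flatMap (fun w => [w ++ [false], w ++ [true]])).map (List.cons b) := by
  induction l with
  | nil => rfl
  | cons w ws ih => simp_all [List.flatMap_cons]

lemma wordsOf_flatMap (k : Nat) :
    (wordsOf k).flatMap (fun w => [w ++ [false], w ++ [true]]) = wordsOf (k + 1) := by
  induction k with
  | zero => rfl
  | succ k ih =>
    show ((wordsOf k).map (List.cons false) ++ (wordsOf k).map (List.cons true)).flatMap
        (fun w => [w ++ [false], w ++ [true]]) = wordsOf (k + 2)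
    rw [List.flatMap_append, List.flatMap_map, List.flatMap_map]
    simp only [List.cons_append]
    rw [flatMap_cons_children, flatMap_cons_children, ih]
    rfl

-- ---------- the abstract BFS finds the first goal word in level order ----------

lemma bfsAbs_no_goal (nm : List Char) (n : Int) (ws : List (List Bool)) :
    ∀ (rest : List (List Bool)) (f : Nat),
      (∀ w ∈ ws, ¬ (ov nm (stampsOf n 0 w) = nm)) →
      bfsAbs nm n (ws.length + f) (ws ++ rest) =
        bfsAbs nm n f (rest ++ ws.flatMap (fun w => [w ++ [false], w ++ [true]])) := by
  induction ws with
  | nil => intro rest f _; simp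
  | cons w ws ih =>
    intro rest f hng
    have hw : ¬ (ov nm (stampsOf n 0 w) = nm) := hng w List.mem_cons_self
    simp only [List.length_cons, List.cons_append]
    rw [show ws.length + 1 + f = (ws.length + f) + 1 by ring]
    simp only [bfsAbs, if_neg hw]
    rw [show (ws ++ rest) ++ [w ++ [false], w ++ [true]] =
        ws ++ (rest ++ [w ++ [false], w ++ [true]]) by simp]
    rw [ih (rest ++ [w ++ [false], w ++ [true]]) f (fun v hv => hng v (List.mem_cons_of_mem _ hv))]
    congr 1
    simp [List.flatMap_cons]

lemma bfsAbs_level (nm : List Char) (n : Int) (ws : List (List Bool)) (f : Nat)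
    (hng : ∀ w ∈ ws, ¬ (ov nm (stampsOf n 0 w) = nm)) :
    bfsAbs nm n (ws.length + f) ws =
      bfsAbs nm n f (ws.flatMap (fun w => [w ++ [false], w ++ [true]])) := by
  have h := bfsAbs_no_goal nm n ws [] f hng
  simpa using h

lemma bfsAbs_found (nm : List Char) (n : Int) (ws : List (List Bool)) :
    ∀ (w : List Bool) (rest : List (List Bool)) (f : Nat),
      (∀ v ∈ ws, ¬ (ov nm (stampsOf n 0 v) = nm)) →
      ov nm (stampsOf n 0 w) = nm →
      ws.length < f →
      bfsAbs nm n f (ws ++ w :: rest) = costOf nm n 0 w - 1 := by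
  induction ws with
  | nil =>
    intro w rest f _ hg hf
    obtain ⟨f', rfl⟩ : ∃ f', f = f' + 1 := ⟨f - 1, by omega⟩
    simp [bfsAbs, hg]
  | cons v ws ih =>
    intro w rest f hng hg hf
    obtain ⟨f', rfl⟩ : ∃ f', f = f' + 1 := ⟨f - 1, by omega⟩
    have hv : ¬ (ov nm (stampsOf n 0 v) = nm) := hng v List.mem_cons_self
    simp only [List.cons_append, bfsAbs, if_neg hv]
    rw [show (ws ++ w :: rest) ++ [v ++ [false], v ++ [true]] =
        ws ++ w :: (rest ++ [v ++ [false], v ++ [true]]) by simp]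
    exact ih w _ f' (fun u hu => hng u (List.mem_cons_of_mem _ hu)) hg (by simpa using hf)

-- goalb states the same thing as A's string test
lemma goalb_iff (nm : List Char) (n : Int) (w : List Bool) :
    goalb nm n w = true ↔ ov nm (stampsOf n 0 w) = nm := by
  rw [goalb, decide_eq_true_iff, ov_eq_iff]

lemma bfsAbs_to_goal (nm : List Char) (n : Int) (m : Nat) :
    ∀ (j f : Nat) (w : List Bool),
      (∀ l, j ≤ l → l < j + m → (wordsOf l).find? (goalb nm n) = none) →
      (wordsOf (j + m)).find? (goalb nm n) = some w →
      2 ^ (j + m) - 2 ^ j + 2 ^ (j + m) ≤ f →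
      bfsAbs nm n f (wordsOf j) = costOf nm n 0 w - 1 := by
  induction m with
  | zero =>
    intro j f w _ hfind hf
    rw [Nat.add_zero] at hfind hf
    rw [List.find?_eq_some_iff_append] at hfind
    obtain ⟨hgw, as, bs, heq, has⟩ := hfind
    rw [heq]
    apply bfsAbs_found nm n as w bs f
    · intro v hv
      have hx := has v hv
      simp only [Bool.not_eq_true'] at hx
      rw [← goalb_iff nm n v, hx]
      simp
    · exact (goalb_iff nm n w).mp hgw
    · have hlt : as.length < (wordsOf j).length := by
        rw [heq, List.length_append, List.length_cons]; omega
      rw [length_wordsOf] at hlt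
      omega
  | succ m ih =>
    intro j f w hnone hfind hf
    have hj : (wordsOf j).find? (goalb nm n) = none := hnone j le_rfl (by omega)
    rw [List.find?_eq_none] at hj
    have hng : ∀ v ∈ wordsOf j, ¬ (ov nm (stampsOf n 0 v) = nm) := by
      intro v hv
      rw [← goalb_iff nm n v]
      simpa using hj v hv
    have hge : 2 ^ j ≤ f := by
      have h1 : (2 : Nat) ^ j ≤ 2 ^ (j + (m + 1)) := Nat.pow_le_pow_right (by norm_num) (by omega)
      omega
    have hfeq : f = (wordsOf j).length + (f - 2 ^ j) := by
      rw [length_wordsOf]; omega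
    rw [hfeq, bfsAbs_level nm n (wordsOf j) (f - 2 ^ j) hng, wordsOf_flatMap]
    apply ih (j + 1) (f - 2 ^ j) w
    · intro l hl1 hl2
      exact hnone l (by omega) (by omega)
    · rw [show (j + 1) + m = j + (m + 1) by omega]
      exact hfind
    · have he : j + (m + 1) = (j + 1) + m := by omega
      rw [he] at hf
      have h2 : (2 : Nat) ^ (j + 1) = 2 ^ j + 2 ^ j := by rw [pow_succ]; ring
      have h1 : (2 : Nat) ^ (j + 1) ≤ 2 ^ ((j + 1) + m) :=
        Nat.pow_le_pow_right (by norm_num) (by omega)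
      omega

-- ---------- B's DFS visits level k in the same order ----------

lemma diffB_eq (nm : List Char) (i : Int) (h0 : 0 ≤ i) (h1 : i < (nm.length : Int)) :
    diffB nm i = diffChar (getCh nm i) := by
  rw [diffB, pyGet?_getCh nm i h0 h1]
  rfl

lemma match_map_or {α β : Type} (f : α → β) (o₁ o₂ : Option α) :
    ((o₁.or o₂).map f) =
      (match o₁.map f with | some r => some r | none => o₂.map f) := by
  cases o₁ <;> rfl

lemma dfsB_spec (nm : List Char) (tgt : PySem.Set Int) (d : Nat) :
    ∀ (i : Int) (S : PySem.Set Int) (c : Int),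
      0 ≤ i → i < (nm.length : Int) →
      dfsB nm tgt (nm.length : Int) i S c d =
        ((wordsOf d).find? (fun w =>
          decide (∀ t ∈ tgt, t ∈ S ∨ t ∈ stampsOf (nm.length : Int) i w))).map
          (fun w => c + costOf nm (nm.length : Int) i w - 1) := by
  induction d with
  | zero =>
    intro i S c h0 h1
    simp only [dfsB, wordsOf]
    by_cases h : ∀ t ∈ tgt, t ∈ S
    · rw [if_pos ((PySem.Set.issubset_iff tgt S).mpr h)]
      have hp : (decide (∀ t ∈ tgt, t ∈ S ∨ t ∈ stampsOf (nm.length : Int) i ([] : List Bool)))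
          = true := by
        simp only [stampsOf, List.not_mem_nil, or_false]
        exact decide_eq_true h
      simp [hp, costOf]
    · have hss : ¬ (tgt.issubset S = true) := fun hb => h ((PySem.Set.issubset_iff tgt S).mp hb)
      rw [if_neg hss]
      have hp : (decide (∀ t ∈ tgt, t ∈ S ∨ t ∈ stampsOf (nm.length : Int) i ([] : List Bool)))
          = false := by
        simp only [stampsOf, List.not_mem_nil, or_false]
        exact decide_eq_false h
      simp [hp]
  | succ d ih =>
    intro i S c h0 h1
    have hs1 := stepP_range (nm.length : Int) i false h0 h1
    have hs2 := stepP_range (nm.length : Int) i true h0 h1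
    simp only [dfsB]
    rw [stepP_left_mod (nm.length : Int) i h0 h1, stepP_right_mod (nm.length : Int) i h0 h1]
    rw [ih (stepP (nm.length : Int) i false) (S.add i) (c + diffB nm i + 1) hs1.1 hs1.2]
    rw [ih (stepP (nm.length : Int) i true) (S.add i) (c + diffB nm i + 1) hs2.1 hs2.2]
    show _ = ((wordsOf (d + 1)).find? _).map _
    rw [show wordsOf (d + 1) = (wordsOf d).map (List.cons false) ++ (wordsOf d).map (List.cons true)
        from rfl]
    rw [List.find?_append, List.find?_map, List.find?_map, match_map_or]
    have hpred : ∀ b : Bool,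
        ((fun w => decide (∀ t ∈ tgt, t ∈ S ∨ t ∈ stampsOf (nm.length : Int) i w)) ∘ List.cons b) =
          (fun w => decide (∀ t ∈ tgt, t ∈ S.add i ∨ t ∈ stampsOf (nm.length : Int)
            (stepP (nm.length : Int) i b) w)) := by
      intro b
      funext w
      simp only [Function.comp_apply]
      rw [decide_eq_decide]
      simp only [stampsOf, List.mem_cons, PySem.Set.mem_add]
      constructor <;> intro h t ht <;> rcases h t ht with h' | h' <;> tauto
    have hval : ∀ b : Bool,
        ((fun w => c + costOf nm (nm.length : Int) i w - 1) ∘ List.cons b) =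
          (fun w => c + diffB nm i + 1 + costOf nm (nm.length : Int)
            (stepP (nm.length : Int) i b) w - 1) := by
      intro b
      funext w
      simp only [Function.comp_apply, costOf, diffB_eq nm i h0 h1]
      ring
    rw [Option.map_map, Option.map_map, hpred false, hpred true, hval false, hval true]
    cases List.find? (fun w => decide (∀ t ∈ tgt, t ∈ S.add i ∨
      t ∈ stampsOf (nm.length : Int) (stepP (nm.length : Int) i false) w)) (wordsOf d) <;> rfl

-- the root predicate of dfsB_spec coincides with goalb
lemma root_pred_eq (nm : List Char) :
    (fun w => decide (∀ t ∈ PySem.Set.ofList (tgtL nm),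
        t ∈ (PySem.Set.empty : PySem.Set Int) ∨ t ∈ stampsOf (nm.length : Int) 0 w)) =
      goalb nm (nm.length : Int) := by
  funext w
  rw [goalb, decide_eq_decide]
  constructor
  · intro h t ht
    rcases h t ((PySem.Set.mem_ofList (tgtL nm) t).mpr ht) with h' | h'
    · exact absurd h' (by simp [PySem.Set.empty])
    · exact h'
  · intro h t ht
    exact Or.inr (h t ((PySem.Set.mem_ofList (tgtL nm) t).mp ht))

-- ---------- the alt loop ----------

lemma altLoop_to_goal (nm : List Char) (hn : 0 < nm.length) (m : Nat) :
    ∀ (k f : Nat) (w : List Bool),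
      (∀ l, k ≤ l → l < k + m →
        (wordsOf l).find? (goalb nm (nm.length : Int)) = none) →
      (wordsOf (k + m)).find? (goalb nm (nm.length : Int)) = some w →
      m < f →
      altLoop nm (PySem.Set.ofList (tgtL nm)) (nm.length : Int) f k =
        costOf nm (nm.length : Int) 0 w - 1 := by
  have hz : (0 : Int) < (nm.length : Int) := by exact_mod_cast hn
  induction m with
  | zero =>
    intro k f w _ hfind hf
    rw [Nat.add_zero] at hfind
    obtain ⟨f', rfl⟩ : ∃ f', f = f' + 1 := ⟨f - 1, by omega⟩
    simp only [altLoop]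
    rw [dfsB_spec nm (PySem.Set.ofList (tgtL nm)) k 0 PySem.Set.empty 0 le_rfl hz,
      root_pred_eq, hfind]
    simp only [Option.map_some]
    omega
  | succ m ih =>
    intro k f w hnone hfind hf
    obtain ⟨f', rfl⟩ : ∃ f', f = f' + 1 := ⟨f - 1, by omega⟩
    simp only [altLoop]
    rw [dfsB_spec nm (PySem.Set.ofList (tgtL nm)) k 0 PySem.Set.empty 0 le_rfl hz,
      root_pred_eq, hnone k le_rfl (by omega)]
    simp only [Option.map_none]
    apply ih (k + 1) f' w
    · intro l hl1 hl2
      exact hnone l (by omega) (by omega)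
    · rw [show (k + 1) + m = k + (m + 1) by omega]
      exact hfind
    · omega

-- ---------- A side: the real loop equals the abstract BFS ----------

lemma loop_corr (nm : List Char) (hn : 0 < nm.length) (f : Nat) :
    ∀ (ws : List (List Bool)),
      solLoop nm ((nm.length : Int) - 1) f (ws.map (stOf nm)) =
        bfsAbs nm (nm.length : Int) f ws := by
  have hz : (0 : Int) < (nm.length : Int) := by exact_mod_cast hn
  induction f with
  | zero => intro ws; rfl
  | succ f ih =>
    intro ws
    cases ws with
    | nil => rfl
    | cons w ws =>
      have hend := endOf_range (nm.length : Int) w 0 le_rfl hz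
      simp only [List.map_cons, stOf, solLoop, bfsAbs]
      by_cases hg : ov nm (stampsOf (nm.length : Int) 0 w) = nm
      · rw [if_pos hg, if_pos hg]
      · rw [if_neg hg, if_neg hg]
        rw [pyGet?_getCh nm (endOf (nm.length : Int) 0 w) hend.1 hend.2]
        dsimp only
        rw [ov_surgery nm (stampsOf (nm.length : Int) 0 w) (endOf (nm.length : Int) 0 w)
          hend.1 hend.2]
        have hc : ∀ b : Bool,
            (ov nm (stampsOf (nm.length : Int) 0 w ++ [endOf (nm.length : Int) 0 w]),
              stepP (nm.length : Int) (endOf (nm.length : Int) 0 w) b,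
              costOf nm (nm.length : Int) 0 w + diffChar (getCh nm (endOf (nm.length : Int) 0 w)) + 1)
            = stOf nm (w ++ [b]) := by
          intro b
          rw [stOf, stampsOf_append, endOf_append, costOf_append]
          refine congrArg _ (congrArg _ ?_)
          omega
        have hq : (ws.map (stOf nm) ++
              [if endOf (nm.length : Int) 0 w - 1 < 0 then
                  (ov nm (stampsOf (nm.length : Int) 0 w ++ [endOf (nm.length : Int) 0 w]),
                    (nm.length : Int) - 1,
                    costOf nm (nm.length : Int) 0 w + diffChar (getCh nm (endOf (nm.length : Int) 0 w)) + 1)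
                else
                  (ov nm (stampsOf (nm.length : Int) 0 w ++ [endOf (nm.length : Int) 0 w]),
                    endOf (nm.length : Int) 0 w - 1,
                    costOf nm (nm.length : Int) 0 w + diffChar (getCh nm (endOf (nm.length : Int) 0 w)) + 1)]) ++
              [if endOf (nm.length : Int) 0 w + 1 > (nm.length : Int) - 1 then
                  (ov nm (stampsOf (nm.length : Int) 0 w ++ [endOf (nm.length : Int) 0 w]),
                    (0 : Int),
                    costOf nm (nm.length : Int) 0 w + diffChar (getCh nm (endOf (nm.length : Int) 0 w)) + 1)
                else
                  (ov nm (stampsOf (nm.length : Int) 0 w ++ [endOf (nm.length : Int) 0 w]),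
                    endOf (nm.length : Int) 0 w + 1,
                    costOf nm (nm.length : Int) 0 w + diffChar (getCh nm (endOf (nm.length : Int) 0 w)) + 1)]
            = (ws ++ [w ++ [false], w ++ [true]]).map (stOf nm) := by
          rw [List.map_append]
          rw [show [w ++ [false], w ++ [true]].map (stOf nm)
              = [stOf nm (w ++ [false]), stOf nm (w ++ [true])] from rfl]
          rw [← hc false, ← hc true]
          simp only [stepP]
          split_ifs <;> simp
        rw [hq, ih]

-- ---------- main theorem ----------

theorem solution_spec : Claim_equal_solution := by
  unfold Claim_equal_solution Spec_solution
  intro name _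
  by_cases hn : name.toList.length = 0
  · have hnil : name.toList = [] := List.eq_nil_of_length_eq_zero hn
    simp only [solution, solution_alt, hnil]
    rfl
  · have hn1 : 0 < name.toList.length := by omega
    have hz : (0 : Int) < (name.toList.length : Int) := by exact_mod_cast hn1
    have hPn : ((wordsOf name.toList.length).find?
        (goalb name.toList (name.toList.length : Int))).isSome = true := by
      rw [List.find?_isSome]
      exact ⟨List.replicate name.toList.length false,
        (mem_wordsOf _ _).mpr (by simp), goalb_allL name.toList hn1⟩
    have hPex : ∃ k, ((wordsOf k).find?
        (goalb name.toList (name.toList.length : Int))).isSome = true :=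
      ⟨name.toList.length, hPn⟩
    have hk0 := Nat.find_spec hPex
    have hk0le : Nat.find hPex ≤ name.toList.length := Nat.find_min' hPex hPn
    have hnone : ∀ l, l < Nat.find hPex →
        (wordsOf l).find? (goalb name.toList (name.toList.length : Int)) = none := by
      intro l hl
      have hmin := Nat.find_min hPex hl
      cases hnl : (wordsOf l).find? (goalb name.toList (name.toList.length : Int)) with
      | none => rfl
      | some v => exact absurd (by rw [hnl]; rfl) hmin
    obtain ⟨w, hw⟩ := Option.isSome_iff_exists.mp hk0
    have hA : solution name
        = costOf name.toList (name.toList.length : Int) 0 w - 1 := by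
      show solLoop name.toList ((name.toList.length : Int) - 1)
          (2 ^ (name.toList.length + 1))
          [(List.replicate name.toList.length 'A', (0 : Int), (0 : Int))] = _
      have hroot : [(List.replicate name.toList.length 'A', (0 : Int), (0 : Int))]
          = [[]].map (stOf name.toList) := by
        simp [stOf, stampsOf, endOf, costOf, ov_nil]
      rw [hroot, loop_corr name.toList hn1 (2 ^ (name.toList.length + 1))]
      show bfsAbs name.toList (name.toList.length : Int)
          (2 ^ (name.toList.length + 1)) (wordsOf 0) = _
      apply bfsAbs_to_goal name.toList (name.toList.length : Int) (Nat.find hPex) 0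
        (2 ^ (name.toList.length + 1)) w
      · intro l _ hl2
        exact hnone l (by omega)
      · rw [Nat.zero_add]
        exact hw
      · rw [Nat.zero_add]
        have ha : (2 : Nat) ^ Nat.find hPex ≤ 2 ^ name.toList.length :=
          Nat.pow_le_pow_right (by norm_num) hk0le
        have hb : (2 : Nat) ^ (name.toList.length + 1)
            = 2 ^ name.toList.length + 2 ^ name.toList.length := by rw [pow_succ]; ring
        have hc : 1 ≤ (2 : Nat) ^ Nat.find hPex := Nat.one_le_two_pow
        omega
    have hB : solution_alt name
        = costOf name.toList (name.toList.length : Int) 0 w - 1 := by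
      show altLoop name.toList (PySem.Set.ofList (tgtL name.toList))
          (name.toList.length : Int) (name.toList.length + 1) 0 = _
      apply altLoop_to_goal name.toList hn1 (Nat.find hPex) 0 (name.toList.length + 1) w
      · intro l _ hl2
        exact hnone l (by omega)
      · rw [Nat.zero_add]
        exact hw
      · omega
    rw [hA, hB]
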